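-- pv_equiv track=rewrite | github.com/src-d/style-analyzer | lookout/style/format/benchmarks/evaluate_smoke.py | calc_aligned_metrics
-- ===== SOURCE A (Python) =====
-- from typing import Any, Dict, List, Mapping, Sequence, Tuple, Union
--
-- def calc_aligned_metrics(bad_style_code: str, correct_style_code: str, generated_code: str
--                          ) -> Tuple[int, int, int, int]:
--     """
--     Calculate model quality metrics for aligned sequences.
--
--     Metrics description:
--     1. Amount of characters misdetected by the model as a style mistake. That is nothing needed to
--        be changed but model did.
--     2. Amount of characters undetected by model. That is the character has to be changed
--        but model did not.
--     3. Amount of characters detected by model as a style mistake but fix was wrong. That is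
--        the character has to be changed and model did but did it wrongly.
--     4. Amount of characters detected by model as a style mistake and fix was correct. That is
--        the character has to be changed and model did it in a correct way :tada:.
--
--     In scientific words:
--     1. False positive.
--     2 + 3. False negative. We have two types of false negatives. First one is when the error was
--            missed and there is no fix. Second one is when the error was found but wrongly
--            fixed.
--     4. True positive.
--
--     :param bad_style_code: The file with style violations. It is files from head revision in the \
--                            smoke dataset.
--     :param correct_style_code: File with correct style. It is files from base revision in  the \
--                                smoke dataset.
--     :param generated_code: Format Analyser model output. The code with fixed style.
--
--     :return: Tuple with 4 metric values.
--     """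
--     detected_wrong_fix = 0
--     detected_correct_fix = 0
--     misdetection = 0
--     undetected = 0
--     for bad_style_c, correct_style_c, generated_c in zip(
--             bad_style_code, correct_style_code, generated_code):
--         if bad_style_c == correct_style_c == generated_c:
--             continue
--         assert bad_style_c in {"\t", " ", "\n", "'", '"', "␣"}
--         assert correct_style_c in {"\t", " ", "\n", "'", '"', "␣"}
--         assert generated_c in {"\t", " ", "\n", "'", '"', "␣"}
--         if bad_style_c == correct_style_c and bad_style_c != generated_c:
--             misdetection += 1
--         elif bad_style_c == generated_c and bad_style_c != correct_style_c:
--             undetected += 1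
--         elif correct_style_c == generated_c and bad_style_c != correct_style_c:
--             detected_correct_fix += 1
--         else:
--             detected_wrong_fix += 1
--
--     # TODO (zurk): Add proper class for benchmark metrics
--     # https://github.com/src-d/style-analyzer/issues/333
--     return misdetection, undetected, detected_wrong_fix, detected_correct_fix
-- ===== SOURCE B (Python) =====
-- def calc_aligned_metrics(bad_style_code: str, correct_style_code: str, generated_code: str):
--     triples = list(zip(bad_style_code, correct_style_code, generated_code))
--     misdetection = sum(1 for b, c, g in triples if b == c and c != g)
--     undetected = sum(1 for b, c, g in triples if b == g and b != c)
--     detected_wrong_fix = sum(1 for b, c, g in triples if b != c and b != g and c != g)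
--     detected_correct_fix = sum(1 for b, c, g in triples if c == g and b != c)
--     return misdetection, undetected, detected_wrong_fix, detected_correct_fix
-- ===== Notes on version B (the rewrite author's own statement) =====
-- stated objective: simpler
-- what changed: A's single loop with a mutable four-way tally and an if/elif chain is replaced by four independent predicate counts over the list of aligned character triples (the detected_wrong_fix bucket becomes the explicit 'all three pairwise distinct' predicate), with no running state and no asserts.
import Mathlib
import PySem

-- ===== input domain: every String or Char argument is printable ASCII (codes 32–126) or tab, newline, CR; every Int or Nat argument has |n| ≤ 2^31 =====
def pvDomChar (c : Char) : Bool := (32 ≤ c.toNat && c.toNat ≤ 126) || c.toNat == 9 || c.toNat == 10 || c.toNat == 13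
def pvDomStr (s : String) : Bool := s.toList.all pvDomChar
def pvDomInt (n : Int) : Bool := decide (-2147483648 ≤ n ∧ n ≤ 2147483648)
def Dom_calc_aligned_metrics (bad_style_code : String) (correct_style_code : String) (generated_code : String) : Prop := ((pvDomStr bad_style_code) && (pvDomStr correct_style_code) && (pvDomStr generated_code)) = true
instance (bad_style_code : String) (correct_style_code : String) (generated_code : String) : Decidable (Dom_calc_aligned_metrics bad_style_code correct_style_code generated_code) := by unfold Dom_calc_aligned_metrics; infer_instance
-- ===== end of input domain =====

-- B replaces A's single running-tally loop with four independent predicate counts over the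
-- aligned triples (simpler: no elif chain, no mutable state); equality of return values is
-- proved on every input where A does not raise (Pre_ excludes A's AssertionError
-- inputs; B simply returns the four counts there).

-- ===== PORT A =====
-- zip(s1, s2, s3) over strings
def pvZip3 : List Char → List Char → List Char → List (Char × Char × Char)
  | b :: bs, c :: cs, g :: gs => (b, c, g) :: pvZip3 bs cs gs
  | _, _, _ => []

-- the loop body of A; state is (misdetection, undetected, detected_wrong_fix, detected_correct_fix)
-- A's asserts (bad_style_c/correct_style_c/generated_c ∈ {"\t"," ","\n","'","\"","␣"}) raise
-- AssertionError exactly on the inputs Pre_calc_aligned_metrics excludes, so they are not modelled here.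
def pvStep (st : Int × Int × Int × Int) (t : Char × Char × Char) : Int × Int × Int × Int :=
  if t.1 == t.2.1 && t.2.1 == t.2.2 then st
  else if t.1 == t.2.1 && t.1 != t.2.2 then (st.1 + 1, st.2.1, st.2.2.1, st.2.2.2)
  else if t.1 == t.2.2 && t.1 != t.2.1 then (st.1, st.2.1 + 1, st.2.2.1, st.2.2.2)
  else if t.2.1 == t.2.2 && t.1 != t.2.1 then (st.1, st.2.1, st.2.2.1, st.2.2.2 + 1)
  else (st.1, st.2.1, st.2.2.1 + 1, st.2.2.2)

def calc_aligned_metrics (bad_style_code : String) (correct_style_code : String) (generated_code : String) : Int × Int × Int × Int :=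
  (pvZip3 bad_style_code.toList correct_style_code.toList generated_code.toList).foldl pvStep (0, 0, 0, 0)

-- ===== PORT B =====
def pvP1 (t : Char × Char × Char) : Bool := t.1 == t.2.1 && t.2.1 != t.2.2
def pvP2 (t : Char × Char × Char) : Bool := t.1 == t.2.2 && t.1 != t.2.1
def pvP3 (t : Char × Char × Char) : Bool := t.1 != t.2.1 && t.1 != t.2.2 && t.2.1 != t.2.2
def pvP4 (t : Char × Char × Char) : Bool := t.2.1 == t.2.2 && t.1 != t.2.1

def calc_aligned_metrics_alt (bad_style_code : String) (correct_style_code : String) (generated_code : String) : Int × Int × Int × Int :=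
  let triples := pvZip3 bad_style_code.toList correct_style_code.toList generated_code.toList
  ((triples.countP pvP1 : Int), (triples.countP pvP2 : Int),
   (triples.countP pvP3 : Int), (triples.countP pvP4 : Int))

-- ===== PRECONDITION & SPEC =====
def pvAllowed (ch : Char) : Bool :=
  ch == '\t' || ch == ' ' || ch == '\n' || ch == '\'' || ch == '"' || ch == '␣'

-- Pre_ excludes exactly the inputs on which A's asserts raise AssertionError: some aligned
-- position (index below all three lengths) whose three characters are not all equal and
-- contain a character outside A's whitelist.
def Pre_calc_aligned_metrics (bad_style_code : String) (correct_style_code : String) (generated_code : String) : Prop :=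
  ∀ i : Nat, i < bad_style_code.toList.length → i < correct_style_code.toList.length →
      i < generated_code.toList.length →
    (bad_style_code.toList.getD i ' ' = correct_style_code.toList.getD i ' ' ∧
     correct_style_code.toList.getD i ' ' = generated_code.toList.getD i ' ') ∨
    (pvAllowed (bad_style_code.toList.getD i ' ') ∧
     pvAllowed (correct_style_code.toList.getD i ' ') ∧
     pvAllowed (generated_code.toList.getD i ' '))
instance (bad_style_code : String) (correct_style_code : String) (generated_code : String) : Decidable (Pre_calc_aligned_metrics bad_style_code correct_style_code generated_code) := by unfold Pre_calc_aligned_metrics; infer_instance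

def pvWitness_calc_aligned_metrics : String × String × String := (" '", "''", "' ")

def Spec_calc_aligned_metrics (bad_style_code : String) (correct_style_code : String) (generated_code : String) (out : Int × Int × Int × Int) : Prop := out = calc_aligned_metrics_alt bad_style_code correct_style_code generated_code
instance (bad_style_code : String) (correct_style_code : String) (generated_code : String) (out : Int × Int × Int × Int) : Decidable (Spec_calc_aligned_metrics bad_style_code correct_style_code generated_code out) := by unfold Spec_calc_aligned_metrics; infer_instance

-- ===== CLAIM (what is proved, stated in full; the proofs are below) =====
def Claim_equal_calc_aligned_metrics : Prop := ∀ (bad_style_code : String) (correct_style_code : String) (generated_code : String), Dom_calc_aligned_metrics bad_style_code correct_style_code generated_code → Pre_calc_aligned_metrics bad_style_code correct_style_code generated_code → Spec_calc_aligned_metrics bad_style_code correct_style_code generated_code (calc_aligned_metrics bad_style_code correct_style_code generated_code)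


-- ===== LEMMAS AND PROOFS =====

-- A's running tally over any prefix equals the starting accumulator plus B's four counts.
lemma pv_fold_eq (l : List (Char × Char × Char)) (mis und dwf dcf : Int) :
    l.foldl pvStep (mis, und, dwf, dcf) =
      (mis + l.countP pvP1, und + l.countP pvP2, dwf + l.countP pvP3, dcf + l.countP pvP4) := by
  induction l generalizing mis und dwf dcf with
  | nil => simp
  | cons t l ih =>
    obtain ⟨b, c, g⟩ := t
    simp only [List.foldl_cons, List.countP_cons, pvStep, pvP1, pvP2, pvP3, pvP4]
    by_cases hbc : b = c <;> by_cases hbg : b = g <;> by_cases hcg : c = g <;>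
      (try rw [ih]) <;> simp_all <;> omega

theorem calc_aligned_metrics_spec : Claim_equal_calc_aligned_metrics := by
  intro b c g _ _
  unfold Spec_calc_aligned_metrics calc_aligned_metrics calc_aligned_metrics_alt
  rw [pv_fold_eq]
  simp
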